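-- pv_equiv track=rewrite | github.com/Epidocs/Past-Exams | S1/Finals/Algo/2021/final-2021-s1-algo-correction.py | list_to_ints2
-- ===== SOURCE A (Python) =====
-- def list_to_ints2(L):
--     left = 0
--     right = 0
--     p = 1
--     for i in range(len(L)):
--         left = left * 10 + L[i]
--         right = right + L[i]*p
--         p = p * 10
--     return (left, right)
-- ===== SOURCE B (Python) =====
-- def list_to_ints2(L):
--     left = 0
--     for d in L:
--         left = left * 10 + d
--     right = 0
--     for d in reversed(L):
--         right = right * 10 + d
--     return (left, right)
-- ===== Notes on version B (the rewrite author's own statement) =====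
-- stated objective: simpler
-- what changed: Replaces the single indexed loop that maintains a positional power accumulator p with two plain Horner loops: left over L and right over reversed(L), dropping p and the index entirely.
import Mathlib
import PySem

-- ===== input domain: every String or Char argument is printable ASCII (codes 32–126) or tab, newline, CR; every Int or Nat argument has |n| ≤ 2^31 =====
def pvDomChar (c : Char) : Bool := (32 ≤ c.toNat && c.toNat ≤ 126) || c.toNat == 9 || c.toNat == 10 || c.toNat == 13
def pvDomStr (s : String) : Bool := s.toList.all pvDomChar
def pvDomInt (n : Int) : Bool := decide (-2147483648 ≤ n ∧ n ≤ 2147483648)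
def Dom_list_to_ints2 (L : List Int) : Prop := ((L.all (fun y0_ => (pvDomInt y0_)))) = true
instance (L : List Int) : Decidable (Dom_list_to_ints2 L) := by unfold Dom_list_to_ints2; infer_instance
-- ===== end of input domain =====

-- B replaces A's single loop with the power accumulator p by two Horner loops (left over L, right over reversed L); objective: simpler.

-- ===== PORT A =====
-- A iterates i over range(len(L)) reading L[i]; the index is always in range, so the
-- loop is transcribed as a fold over the elements carrying the same state (left, right, p).
def list_to_ints2 (L : List Int) : Int × Int :=
  let s := L.foldl (fun (st : Int × Int × Int) d => (st.1 * 10 + d, st.2.1 + d * st.2.2, st.2.2 * 10)) (0, 0, 1)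
  (s.1, s.2.1)

-- ===== PORT B =====
def list_to_ints2_alt (L : List Int) : Int × Int :=
  (L.foldl (fun a d => a * 10 + d) 0, L.reverse.foldl (fun a d => a * 10 + d) 0)

-- ===== PRECONDITION & SPEC =====
def Spec_list_to_ints2 (L : List Int) (out : Int × Int) : Prop := out = list_to_ints2_alt L
instance (L : List Int) (out : Int × Int) : Decidable (Spec_list_to_ints2 L out) := by unfold Spec_list_to_ints2; infer_instance

-- ===== CLAIM (what is proved, stated in full; the proofs are below) =====
def Claim_equal_list_to_ints2 : Prop := ∀ (L : List Int), Dom_list_to_ints2 L → Spec_list_to_ints2 L (list_to_ints2 L)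

-- ===== LEMMAS AND PROOFS =====

-- value of L read with positional weights 10^i (A's `right`)
def pvValLE (L : List Int) : Int :=
  match L with
  | [] => 0
  | d :: t => d + 10 * pvValLE t

theorem pvFoldA (L : List Int) :
    ∀ (l r p : Int),
      L.foldl (fun (st : Int × Int × Int) d => (st.1 * 10 + d, st.2.1 + d * st.2.2, st.2.2 * 10)) (l, r, p)
      = (L.foldl (fun a d => a * 10 + d) l, r + p * pvValLE L, p * 10 ^ L.length) := by
  induction L with
  | nil => intro l r p; simp [pvValLE]
  | cons d t ih =>
      intro l r p
      simp only [List.foldl_cons, List.length_cons, pvValLE, ih]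
      refine Prod.ext rfl (Prod.ext ?_ ?_) <;> simp <;> ring

theorem pvFoldB (L : List Int) :
    L.reverse.foldl (fun a d => a * 10 + d) 0 = pvValLE L := by
  induction L with
  | nil => simp [pvValLE]
  | cons d t ih => simp [List.foldl_append, pvValLE, ih]; ring

-- ===== VERDICT (by name: the statement is the Claim_ definition above) =====
theorem list_to_ints2_spec : Claim_equal_list_to_ints2 := by
  intro L _
  unfold Spec_list_to_ints2 list_to_ints2 list_to_ints2_alt
  simp only [pvFoldA L 0 0 1, pvFoldB L]
  simp
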